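-- pv_equiv track=rewrite | github.com/Shahriar-Kabir-IT/PDF-to-CSV-Extractor | llm_pdf_extractor.py | normalize_amount
-- ===== SOURCE A (Python) =====
-- from typing import List, Optional, Tuple, Dict, Any
--
-- def normalize_amount(value: Any) -> str:
--     """Normalize European-formatted numeric strings like '2.531,05' -> '2531.05'.
--     Returns string to keep consistent CSV typing without guessing decimals for non-numbers.
--     """
--     if value is None:
--         return ""
--     s = str(value).strip()
--     if not s:
--         return ""
--     # Replace thousands separators and comma decimal
--     s = s.replace(".", "").replace(",", ".")
--     # Keep only digits and decimal point
--     cleaned = []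
--     dot_seen = False
--     for ch in s:
--         if ch.isdigit():
--             cleaned.append(ch)
--         elif ch == "." and not dot_seen:
--             cleaned.append(ch)
--             dot_seen = True
--     out = "".join(cleaned)
--     return out
-- ===== SOURCE B (Python) =====
-- def normalize_amount(value):
--     """Normalize European-formatted numeric strings like '2.531,05' -> '2531.05'."""
--     if value is None:
--         return ""
--     t = str(value).strip()
--     if not t:
--         return ""
--     t = t.replace(".", "").replace(",", ".")
--     head, sep, tail = t.partition(".")
--     if sep:
--         return "".join(c for c in head if c.isdigit()) + "." + "".join(c for c in tail if c.isdigit())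
--     return "".join(c for c in head if c.isdigit())
-- ===== Notes on version B (the rewrite author's own statement) =====
-- stated objective: alternative
-- what changed: Replaced the single char loop with a dot_seen flag by splitting the transformed string at its first dot with partition and filtering digits in the two segments separately.
import Mathlib
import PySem

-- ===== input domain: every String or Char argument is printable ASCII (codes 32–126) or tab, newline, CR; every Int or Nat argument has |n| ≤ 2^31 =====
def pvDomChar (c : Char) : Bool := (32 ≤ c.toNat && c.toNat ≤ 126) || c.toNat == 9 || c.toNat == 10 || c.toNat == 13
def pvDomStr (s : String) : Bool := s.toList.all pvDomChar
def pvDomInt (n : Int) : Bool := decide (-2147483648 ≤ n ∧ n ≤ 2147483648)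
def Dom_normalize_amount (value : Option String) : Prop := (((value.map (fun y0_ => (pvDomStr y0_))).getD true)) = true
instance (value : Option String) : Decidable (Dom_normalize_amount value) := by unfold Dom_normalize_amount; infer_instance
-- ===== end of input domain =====

-- ===== PORT A =====
-- B changes the decomposition: instead of A's char loop with a dot_seen flag, it
-- splits at the first dot and filters digits in the two segments (alternative, same cost).
-- helper: the for-loop of A (cleaned list accumulator + dot_seen flag), transliterated
def pvCleanLoopA : List Char → List Char → Bool → List Char
  | [], acc, _ => acc
  | ch :: rest, acc, dot =>
    if PySem.Chars.isdigit ch then pvCleanLoopA rest (acc ++ [ch]) dot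
    else if ch = '.' ∧ ¬ dot then pvCleanLoopA rest (acc ++ [ch]) true
    else pvCleanLoopA rest acc dot

def normalize_amount (value : Option String) : String :=
  match value with
  | none => ""
  | some v =>
    let s := PySem.Str.strip v
    if s = "" then ""
    else
      let s := PySem.Str.replace (PySem.Str.replace s "." "") "," "."
      String.ofList (pvCleanLoopA s.toList [] false)

-- ===== PORT B =====
def normalize_amount_alt (value : Option String) : String :=
  match value with
  | none => ""
  | some v =>
    let t := PySem.Str.strip v
    if t = "" then ""
    else
      let t2 := PySem.Str.replace (PySem.Str.replace t "." "") "," "."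
      -- head, sep, tail = t.partition(".")
      let cs := t2.toList
      let head := cs.takeWhile (fun c => c ≠ '.')
      let rest := cs.dropWhile (fun c => c ≠ '.')
      if rest = [] then String.ofList (head.filter PySem.Chars.isdigit)
      else String.ofList (head.filter PySem.Chars.isdigit ++ '.' :: rest.tail.filter PySem.Chars.isdigit)

-- ===== PRECONDITION & SPEC =====
def Spec_normalize_amount (value : Option String) (out : String) : Prop := out = normalize_amount_alt value
instance (value : Option String) (out : String) : Decidable (Spec_normalize_amount value out) := by unfold Spec_normalize_amount; infer_instance

-- ===== CLAIM (what is proved, stated in full; the proofs are below) =====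
def Claim_equal_normalize_amount : Prop := ∀ (value : Option String), Dom_normalize_amount value → Spec_normalize_amount value (normalize_amount value)

-- ===== LEMMAS AND PROOFS =====

lemma pvCleanLoopA_eq (cs : List Char) : ∀ (acc : List Char) (dot : Bool),
    pvCleanLoopA cs acc dot = acc ++
      (if dot then cs.filter PySem.Chars.isdigit
       else
         let head := cs.takeWhile (fun c => c ≠ '.')
         let rest := cs.dropWhile (fun c => c ≠ '.')
         if rest = [] then head.filter PySem.Chars.isdigit
         else head.filter PySem.Chars.isdigit ++ '.' :: rest.tail.filter PySem.Chars.isdigit) := by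
  induction cs with
  | nil => intro acc dot; cases dot <;> simp [pvCleanLoopA]
  | cons ch rest ih =>
    intro acc dot
    by_cases hd : PySem.Chars.isdigit ch = true
    · have hne : ch ≠ '.' := by
        intro h; subst h; simp [PySem.Chars.isdigit] at hd
      cases dot <;>
        (simp [pvCleanLoopA, hd, hne, ih] <;> split_ifs <;> rfl)
    · by_cases hdot : ch = '.'
      · subst hdot
        cases dot <;>
          simp [pvCleanLoopA, hd, ih]
      · cases dot <;>
          simp [pvCleanLoopA, hd, hdot, ih]

-- ===== VERDICT (by name: the statement is the Claim_ definition above) =====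
theorem normalize_amount_spec : Claim_equal_normalize_amount := by
  intro value _
  unfold Spec_normalize_amount
  cases value with
  | none => rfl
  | some v =>
    by_cases h : PySem.Str.strip v = ""
    · simp [normalize_amount, normalize_amount_alt, h]
    · simp only [normalize_amount, normalize_amount_alt, if_neg h]
      rw [pvCleanLoopA_eq]
      simp only [List.nil_append, Bool.false_eq_true, if_false]
      exact apply_ite String.ofList _ _ _
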